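-- pv_equiv track=rewrite | github.com/alfrando24/Tubes-TBA-Kelompok-8 | TBA.py | keterangan
-- ===== SOURCE A (Python) =====
-- def keterangan(word: str) -> bool:
--     #ditoko, didapur, diigd, dibengkel, disawah
--     current_State_Q = 0
--     for letter in word:
--         match current_State_Q:
--             case -1: break
--             case 0: current_State_Q = 1 if letter == 'd' else -1
--             case 1: current_State_Q = 2 if letter == 'i' else -1
--             case 2:
--                 if letter == 't': current_State_Q = 3
--                 elif letter == 'd': current_State_Q = 7
--                 elif letter == 'b': current_State_Q = 12
--                 elif letter =='i': current_State_Q=19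
--                 elif letter == 's':current_State_Q=22
--                 else: current_State_Q = -1
--             case 3: current_State_Q = 4 if letter=='o' else -1
--             case 4: current_State_Q = 5 if letter=='k' else -1
--             case 5: current_State_Q = 6 if letter=='o' else -1 #final state toko
--             case 7: current_State_Q = 8 if letter=='a' else -1
--             case 8: current_State_Q = 9 if letter=='p' else -1
--             case 9: current_State_Q = 10 if letter=='u' else -1
--             case 10: current_State_Q = 11 if letter=='r' else -1 #final state dapur
--             case 12: current_State_Q = 13 if letter=='e' else -1
--             case 13: current_State_Q = 14 if letter=='n' else -1
--             case 14: current_State_Q = 15 if letter=='g' else -1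
--             case 15: current_State_Q = 16 if letter=='k' else -1
--             case 16: current_State_Q = 17 if letter=='e' else -1
--             case 17: current_State_Q = 18 if letter=='l' else -1 #final state bengkel
--             case 19: current_State_Q = 20 if letter=='g' else -1
--             case 20: current_State_Q = 21 if letter=='d' else -1 #final state igd
--             case 22: current_State_Q = 23 if letter=='a' else -1
--             case 23: current_State_Q = 24 if letter=='w' else -1
--             case 24: current_State_Q = 25 if letter=='a' else -1
--             case 25: current_State_Q = 26 if letter=='h' else -1 #final state sawah
--     return current_State_Q in {6, 11, 18, 21, 26}
-- ===== SOURCE B (Python) =====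
-- def keterangan(word: str) -> bool:
--     return any(word.startswith(p) for p in ("ditoko", "didapur", "dibengkel", "diigd", "disawah"))
-- ===== Notes on version B (the rewrite author's own statement) =====
-- stated objective: simpler
-- what changed: Replaces the 27-state hand-written DFA loop with a one-line any/startswith over the five accepted prefixes (trailing characters after a match are ignored by the DFA, so the language is exactly 'has one of these five prefixes').
import Mathlib
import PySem

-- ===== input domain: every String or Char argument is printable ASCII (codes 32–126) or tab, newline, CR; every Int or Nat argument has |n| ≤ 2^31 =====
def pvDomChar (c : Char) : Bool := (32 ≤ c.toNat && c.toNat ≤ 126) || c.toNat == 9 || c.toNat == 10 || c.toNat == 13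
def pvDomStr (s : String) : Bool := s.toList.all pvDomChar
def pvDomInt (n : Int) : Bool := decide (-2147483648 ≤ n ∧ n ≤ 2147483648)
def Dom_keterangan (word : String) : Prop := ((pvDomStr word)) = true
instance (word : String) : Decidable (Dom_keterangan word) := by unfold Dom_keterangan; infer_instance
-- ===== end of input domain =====

-- B replaces A's hand-written 27-state DFA loop with a startswith check over the
-- five accepted prefixes (objective: simpler); same return value on every input.

-- ===== PORT A =====
-- one step of the `match current_State_Q` body; the default (no matching case) leaves q unchanged
def ketStep (q : Int) (c : Char) : Int :=
  if q = 0 then (if c = 'd' then 1 else -1)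
  else if q = 1 then (if c = 'i' then 2 else -1)
  else if q = 2 then
    (if c = 't' then 3 else if c = 'd' then 7 else if c = 'b' then 12
     else if c = 'i' then 19 else if c = 's' then 22 else -1)
  else if q = 3 then (if c = 'o' then 4 else -1)
  else if q = 4 then (if c = 'k' then 5 else -1)
  else if q = 5 then (if c = 'o' then 6 else -1)
  else if q = 7 then (if c = 'a' then 8 else -1)
  else if q = 8 then (if c = 'p' then 9 else -1)
  else if q = 9 then (if c = 'u' then 10 else -1)
  else if q = 10 then (if c = 'r' then 11 else -1)
  else if q = 12 then (if c = 'e' then 13 else -1)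
  else if q = 13 then (if c = 'n' then 14 else -1)
  else if q = 14 then (if c = 'g' then 15 else -1)
  else if q = 15 then (if c = 'k' then 16 else -1)
  else if q = 16 then (if c = 'e' then 17 else -1)
  else if q = 17 then (if c = 'l' then 18 else -1)
  else if q = 19 then (if c = 'g' then 20 else -1)
  else if q = 20 then (if c = 'd' then 21 else -1)
  else if q = 22 then (if c = 'a' then 23 else -1)
  else if q = 23 then (if c = 'w' then 24 else -1)
  else if q = 24 then (if c = 'a' then 25 else -1)
  else if q = 25 then (if c = 'h' then 26 else -1)
  else q

-- the `for letter in word` loop; `case -1: break` = stop iterating once q = -1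
def ketLoop (q : Int) : List Char → Int
  | [] => q
  | c :: cs => if q = -1 then q else ketLoop (ketStep q c) cs

def keterangan (word : String) : Bool :=
  let q := ketLoop 0 word.toList
  q == 6 || q == 11 || q == 18 || q == 21 || q == 26

-- ===== PORT B =====
def keterangan_alt (word : String) : Bool :=
  (["ditoko", "didapur", "dibengkel", "diigd", "disawah"] : List String).any
    (fun p => PySem.Str.startswith word p)

-- ===== PRECONDITION & SPEC =====
def Spec_keterangan (word : String) (out : Bool) : Prop := out = keterangan_alt word
instance (word : String) (out : Bool) : Decidable (Spec_keterangan word out) := by unfold Spec_keterangan; infer_instance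

-- ===== CLAIM (what is proved, stated in full; the proofs are below) =====
def Claim_equal_keterangan : Prop := ∀ (word : String), Dom_keterangan word → Spec_keterangan word (keterangan word)

-- ===== LEMMAS AND PROOFS =====

def ketAccept (q : Int) : Bool := q == 6 || q == 11 || q == 18 || q == 21 || q == 26

theorem ketLoop_dead (l : List Char) : ketLoop (-1) l = -1 := by
  cases l <;> simp [ketLoop]

-- a final state with no outgoing case absorbs; generic base of the chains
theorem ket_base (q : Int) (hq : ketAccept q = true) (habs : ∀ c, ketStep q c = q)
    (hq1 : q ≠ -1) : ∀ l, ketAccept (ketLoop q l) = true ↔ ([] : List Char) <+: l := by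
  intro l
  induction l with
  | nil => simp [ketLoop, hq]
  | cons c cs ih => simp [ketLoop, hq1, habs] at *; simp [ih]

-- one link of a linear chain: state q reads ch and moves to q', anything else dies
theorem ket_chain (q q' : Int) (ch : Char) (R : List Char)
    (hq1 : q ≠ -1) (hacc : ketAccept q = false)
    (hstep : ∀ c, ketStep q c = if c = ch then q' else -1)
    (ih : ∀ l, ketAccept (ketLoop q' l) = true ↔ R <+: l) :
    ∀ l, ketAccept (ketLoop q l) = true ↔ (ch :: R) <+: l := by
  intro l
  cases l with
  | nil => simp [ketLoop, hacc]
  | cons c cs =>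
    simp only [ketLoop, hq1, if_false, hstep, List.cons_prefix_cons]
    by_cases hc : c = ch
    · simp [hc, ih]
    · simp [hc, ketLoop_dead, Ne.symm hc, ketAccept]

theorem ket_s6 : ∀ l, ketAccept (ketLoop 6 l) = true ↔ ([] : List Char) <+: l :=
  ket_base 6 (by decide) (fun c => by simp [ketStep]) (by decide)
theorem ket_s5 : ∀ l, ketAccept (ketLoop 5 l) = true ↔ ['o'] <+: l :=
  ket_chain 5 6 'o' [] (by decide) (by decide) (fun c => by simp [ketStep]) ket_s6
theorem ket_s4 : ∀ l, ketAccept (ketLoop 4 l) = true ↔ ['k', 'o'] <+: l :=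
  ket_chain 4 5 'k' ['o'] (by decide) (by decide) (fun c => by simp [ketStep]) ket_s5
theorem ket_s3 : ∀ l, ketAccept (ketLoop 3 l) = true ↔ ['o', 'k', 'o'] <+: l :=
  ket_chain 3 4 'o' ['k', 'o'] (by decide) (by decide) (fun c => by simp [ketStep]) ket_s4

theorem ket_s11 : ∀ l, ketAccept (ketLoop 11 l) = true ↔ ([] : List Char) <+: l :=
  ket_base 11 (by decide) (fun c => by simp [ketStep]) (by decide)
theorem ket_s10 : ∀ l, ketAccept (ketLoop 10 l) = true ↔ ['r'] <+: l :=
  ket_chain 10 11 'r' [] (by decide) (by decide) (fun c => by simp [ketStep]) ket_s11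
theorem ket_s9 : ∀ l, ketAccept (ketLoop 9 l) = true ↔ ['u', 'r'] <+: l :=
  ket_chain 9 10 'u' ['r'] (by decide) (by decide) (fun c => by simp [ketStep]) ket_s10
theorem ket_s8 : ∀ l, ketAccept (ketLoop 8 l) = true ↔ ['p', 'u', 'r'] <+: l :=
  ket_chain 8 9 'p' ['u', 'r'] (by decide) (by decide) (fun c => by simp [ketStep]) ket_s9
theorem ket_s7 : ∀ l, ketAccept (ketLoop 7 l) = true ↔ ['a', 'p', 'u', 'r'] <+: l :=
  ket_chain 7 8 'a' ['p', 'u', 'r'] (by decide) (by decide) (fun c => by simp [ketStep]) ket_s8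

theorem ket_s18 : ∀ l, ketAccept (ketLoop 18 l) = true ↔ ([] : List Char) <+: l :=
  ket_base 18 (by decide) (fun c => by simp [ketStep]) (by decide)
theorem ket_s17 : ∀ l, ketAccept (ketLoop 17 l) = true ↔ ['l'] <+: l :=
  ket_chain 17 18 'l' [] (by decide) (by decide) (fun c => by simp [ketStep]) ket_s18
theorem ket_s16 : ∀ l, ketAccept (ketLoop 16 l) = true ↔ ['e', 'l'] <+: l :=
  ket_chain 16 17 'e' ['l'] (by decide) (by decide) (fun c => by simp [ketStep]) ket_s17
theorem ket_s15 : ∀ l, ketAccept (ketLoop 15 l) = true ↔ ['k', 'e', 'l'] <+: l :=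
  ket_chain 15 16 'k' ['e', 'l'] (by decide) (by decide) (fun c => by simp [ketStep]) ket_s16
theorem ket_s14 : ∀ l, ketAccept (ketLoop 14 l) = true ↔ ['g', 'k', 'e', 'l'] <+: l :=
  ket_chain 14 15 'g' ['k', 'e', 'l'] (by decide) (by decide) (fun c => by simp [ketStep]) ket_s15
theorem ket_s13 : ∀ l, ketAccept (ketLoop 13 l) = true ↔ ['n', 'g', 'k', 'e', 'l'] <+: l :=
  ket_chain 13 14 'n' ['g', 'k', 'e', 'l'] (by decide) (by decide) (fun c => by simp [ketStep]) ket_s14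
theorem ket_s12 : ∀ l, ketAccept (ketLoop 12 l) = true ↔ ['e', 'n', 'g', 'k', 'e', 'l'] <+: l :=
  ket_chain 12 13 'e' ['n', 'g', 'k', 'e', 'l'] (by decide) (by decide) (fun c => by simp [ketStep]) ket_s13

theorem ket_s21 : ∀ l, ketAccept (ketLoop 21 l) = true ↔ ([] : List Char) <+: l :=
  ket_base 21 (by decide) (fun c => by simp [ketStep]) (by decide)
theorem ket_s20 : ∀ l, ketAccept (ketLoop 20 l) = true ↔ ['d'] <+: l :=
  ket_chain 20 21 'd' [] (by decide) (by decide) (fun c => by simp [ketStep]) ket_s21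
theorem ket_s19 : ∀ l, ketAccept (ketLoop 19 l) = true ↔ ['g', 'd'] <+: l :=
  ket_chain 19 20 'g' ['d'] (by decide) (by decide) (fun c => by simp [ketStep]) ket_s20

theorem ket_s26 : ∀ l, ketAccept (ketLoop 26 l) = true ↔ ([] : List Char) <+: l :=
  ket_base 26 (by decide) (fun c => by simp [ketStep]) (by decide)
theorem ket_s25 : ∀ l, ketAccept (ketLoop 25 l) = true ↔ ['h'] <+: l :=
  ket_chain 25 26 'h' [] (by decide) (by decide) (fun c => by simp [ketStep]) ket_s26
theorem ket_s24 : ∀ l, ketAccept (ketLoop 24 l) = true ↔ ['a', 'h'] <+: l :=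
  ket_chain 24 25 'a' ['h'] (by decide) (by decide) (fun c => by simp [ketStep]) ket_s25
theorem ket_s23 : ∀ l, ketAccept (ketLoop 23 l) = true ↔ ['w', 'a', 'h'] <+: l :=
  ket_chain 23 24 'w' ['a', 'h'] (by decide) (by decide) (fun c => by simp [ketStep]) ket_s24
theorem ket_s22 : ∀ l, ketAccept (ketLoop 22 l) = true ↔ ['a', 'w', 'a', 'h'] <+: l :=
  ket_chain 22 23 'a' ['w', 'a', 'h'] (by decide) (by decide) (fun c => by simp [ketStep]) ket_s23

theorem ket_s2 : ∀ l, ketAccept (ketLoop 2 l) = true ↔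
    (['t','o','k','o'] <+: l ∨ ['d','a','p','u','r'] <+: l ∨
     ['b','e','n','g','k','e','l'] <+: l ∨ ['i','g','d'] <+: l ∨
     ['s','a','w','a','h'] <+: l) := by
  intro l
  cases l with
  | nil => simp [ketLoop, ketAccept]
  | cons c cs =>
    have h2 : ketStep 2 c = if c = 't' then 3 else if c = 'd' then 7 else if c = 'b' then 12
        else if c = 'i' then 19 else if c = 's' then 22 else -1 := by simp [ketStep]
    simp only [ketLoop, show ¬((2 : Int) = -1) by decide, if_false, h2, List.cons_prefix_cons]
    by_cases ht : c = 't'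
    · simp [ht, ket_s3]
    · by_cases hd : c = 'd'
      · simp [ht, hd, ket_s7]
      · by_cases hb : c = 'b'
        · simp [ht, hd, hb, ket_s12]
        · by_cases hi : c = 'i'
          · simp [ht, hd, hb, hi, ket_s19]
          · by_cases hs : c = 's'
            · simp [ht, hd, hb, hi, hs, ket_s22]
            · simp [ht, hd, hb, hi, hs, ketLoop_dead, ketAccept,
                Ne.symm ht, Ne.symm hd, Ne.symm hb, Ne.symm hi, Ne.symm hs]

theorem ket_s1 : ∀ l, ketAccept (ketLoop 1 l) = true ↔
    (['i','t','o','k','o'] <+: l ∨ ['i','d','a','p','u','r'] <+: l ∨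
     ['i','b','e','n','g','k','e','l'] <+: l ∨ ['i','i','g','d'] <+: l ∨
     ['i','s','a','w','a','h'] <+: l) := by
  intro l
  cases l with
  | nil => simp [ketLoop, ketAccept]
  | cons c cs =>
    have h1 : ketStep 1 c = if c = 'i' then 2 else -1 := by simp [ketStep]
    simp only [ketLoop, show ¬((1 : Int) = -1) by decide, if_false, h1, List.cons_prefix_cons]
    by_cases hi : c = 'i'
    · simp [hi, ket_s2]
    · simp [hi, ketLoop_dead, ketAccept, Ne.symm hi]

theorem ket_s0 : ∀ l, ketAccept (ketLoop 0 l) = true ↔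
    (['d','i','t','o','k','o'] <+: l ∨ ['d','i','d','a','p','u','r'] <+: l ∨
     ['d','i','b','e','n','g','k','e','l'] <+: l ∨ ['d','i','i','g','d'] <+: l ∨
     ['d','i','s','a','w','a','h'] <+: l) := by
  intro l
  cases l with
  | nil => simp [ketLoop, ketAccept]
  | cons c cs =>
    have h0 : ketStep 0 c = if c = 'd' then 1 else -1 := by simp [ketStep]
    simp only [ketLoop, show ¬((0 : Int) = -1) by decide, if_false, h0, List.cons_prefix_cons]
    by_cases hd : c = 'd'
    · simp [hd, ket_s1]
    · simp [hd, ketLoop_dead, ketAccept, Ne.symm hd]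

-- ===== VERDICT (by name: the statement is the Claim_ definition above) =====
theorem keterangan_spec : Claim_equal_keterangan := by
  unfold Claim_equal_keterangan Spec_keterangan
  intro word _
  rw [show keterangan word = ketAccept (ketLoop 0 word.toList) from rfl, Bool.eq_iff_iff,
    ket_s0 word.toList]
  have e1 : "ditoko".toList = ['d','i','t','o','k','o'] := by decide
  have e2 : "didapur".toList = ['d','i','d','a','p','u','r'] := by decide
  have e3 : "dibengkel".toList = ['d','i','b','e','n','g','k','e','l'] := by decide
  have e4 : "diigd".toList = ['d','i','i','g','d'] := by decide
  have e5 : "disawah".toList = ['d','i','s','a','w','a','h'] := by decide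
  simp [keterangan_alt, PySem.Chars.startswith_iff, e1, e2, e3, e4, e5]
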